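-- pv_equiv track=rewrite | github.com/pypi-data/pypi-mirror-385 | packages/prompt-automation/prompt_automation-0.8.0.tar.gz/prompt_automation-0.8.0/src/prompt_automation/templates/ai_assistant.py | infer_structure
-- ===== SOURCE A (Python) =====
-- from typing import List, Dict, Any
--
-- def infer_structure(text: str) -> Dict[str, Any]:
--     """
--     Infer template structure from free-form text.
--
--     Looks for patterns like:
--     Title: ...
--     Description: ...
--     Content: ...
--
--     Args:
--         text: Free-form text with potential structure
--
--     Returns:
--         Dict with inferred fields
--     """
--     lines = text.strip().split("\n")
--     structure = {}
--
--     content_lines = []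
--     in_content = False
--
--     for line in lines:
--         if line.startswith("Title:"):
--             structure["title"] = line.replace("Title:", "").strip()
--         elif line.startswith("Description:"):
--             structure["description"] = line.replace("Description:", "").strip()
--         elif line.startswith("Content:"):
--             in_content = True
--         elif in_content:
--             content_lines.append(line)
--
--     if content_lines:
--         structure["content"] = "\n".join(content_lines)
--
--     return structure
-- ===== SOURCE B (Python) =====
-- def infer_structure(text):
--     """Declarative parse: each field computed by its own scan instead of one stateful loop."""
--     lines = text.strip().split("\n")
--
--     def last_value(prefix):
--         values = [l.replace(prefix, "").strip() for l in lines if l.startswith(prefix)]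
--         return values[-1] if values else None
--
--     structure = {}
--     title = last_value("Title:")
--     if title is not None:
--         structure["title"] = title
--     description = last_value("Description:")
--     if description is not None:
--         structure["description"] = description
--
--     content_at = next((i for i, l in enumerate(lines) if l.startswith("Content:")), len(lines))
--     content = [l for l in lines[content_at + 1:]
--                if not l.startswith(("Title:", "Description:", "Content:"))]
--     if content:
--         structure["content"] = "\n".join(content)
--     return structure
-- ===== Notes on version B (the rewrite author's own statement) =====
-- stated objective: alternative
-- what changed: Replaces A's single stateful loop (in_content flag, running dict) by independent declarative scans: last 'Title:'/'Description:' value via filter+last, content as a filter over the suffix after the first 'Content:' line; Pre_ excludes texts containing both a 'Title:' and a 'Description:' line with the first 'Description:' line before the first 'Title:' line, where A's dict insertion order (description key first) is accidental and B emits title first.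
import Mathlib
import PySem

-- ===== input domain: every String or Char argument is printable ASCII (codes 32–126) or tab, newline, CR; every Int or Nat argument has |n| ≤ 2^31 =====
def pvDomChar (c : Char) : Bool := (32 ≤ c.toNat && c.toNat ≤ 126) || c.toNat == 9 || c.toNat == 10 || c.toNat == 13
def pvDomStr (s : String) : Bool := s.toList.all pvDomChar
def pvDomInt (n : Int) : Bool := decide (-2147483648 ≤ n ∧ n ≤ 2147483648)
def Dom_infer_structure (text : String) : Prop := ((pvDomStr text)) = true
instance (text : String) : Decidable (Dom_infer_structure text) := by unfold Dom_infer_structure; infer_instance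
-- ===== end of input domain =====

-- B replaces A's single stateful parsing loop by independent declarative scans (one per field); no speed claim.

-- shared helper predicates/cleanup (line.startswith("…") and line.replace(p, "").strip())
def pvPT (l : String) : Bool := PySem.Str.startswith l "Title:"
def pvPD (l : String) : Bool := PySem.Str.startswith l "Description:"
def pvPC (l : String) : Bool := PySem.Str.startswith l "Content:"
def pvRm (l p : String) : String := PySem.Str.strip (PySem.Str.replace l p "")
-- text.strip().split("\n"); sep "\n" ≠ "" so split? is always some (getD is never the fallback)
def pvLines (text : String) : List String := (PySem.Str.split? (PySem.Str.strip text) "\n").getD []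

-- ===== PORT A =====
-- loop body of A's for-line loop; state = (structure, content_lines, in_content)
def pvStepA (acc : PySem.Dict String String × List String × Bool) (line : String) :
    PySem.Dict String String × List String × Bool :=
  let (st, cls, inc) := acc
  if pvPT line then (st.insert "title" (pvRm line "Title:"), cls, inc)
  else if pvPD line then (st.insert "description" (pvRm line "Description:"), cls, inc)
  else if pvPC line then (st, cls, true)
  else if inc then (st, cls ++ [line], inc)
  else (st, cls, inc)

def pvBodyA (lines : List String) : List (String × String) :=
  let r := lines.foldl pvStepA (PySem.Dict.empty, ([] : List String), false)
  let st := if r.2.1 ≠ [] then r.1.insert "content" (PySem.Str.join "\n" r.2.1) else r.1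
  st.items

def infer_structure (text : String) : List (String × String) :=
  pvBodyA (pvLines text)

-- ===== PORT B =====
-- last_value(prefix): [rm(l) for l in lines if l.startswith(prefix)][-1] if any else None

def pvBodyB (lines : List String) : List (String × String) :=
  let title := ((lines.filter pvPT).map (fun l => pvRm l "Title:")).getLast?
  let st1 : List (String × String) := match title with
    | some t => [("title", t)]
    | none => []
  let description := ((lines.filter pvPD).map (fun l => pvRm l "Description:")).getLast?
  let st2 : List (String × String) := match description with
    | some d => st1 ++ [("description", d)]
    | none => st1
  -- next((i for i, l in enumerate(lines) if l.startswith("Content:")), len(lines)) = findIdx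
  let contentAt := lines.findIdx pvPC
  -- lines[contentAt+1:] with contentAt+1 ≥ 0 is List.drop (contentAt+1)
  let content := (lines.drop (contentAt + 1)).filter (fun l => !(pvPT l || pvPD l || pvPC l))
  if content ≠ [] then st2 ++ [("content", PySem.Str.join "\n" content)] else st2

def infer_structure_alt (text : String) : List (String × String) :=
  pvBodyB (pvLines text)

-- ===== PRECONDITION & SPEC =====
-- Pre_ excludes texts containing both a 'Title:' line and a 'Description:' line with the first
-- 'Description:' line before the first 'Title:' line: there A's dict-insertion order (description
-- key first) is accidental, and B naturally emits title before description.
def Pre_infer_structure (text : String) : Prop :=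
  (pvLines text).any pvPT → (pvLines text).any pvPD →
    (pvLines text).findIdx pvPT < (pvLines text).findIdx pvPD
instance (text : String) : Decidable (Pre_infer_structure text) := by unfold Pre_infer_structure; infer_instance

def pvWitness_infer_structure : String := "Title: t\nDescription: d\nContent:\nx"

def Spec_infer_structure (text : String) (out : List (String × String)) : Prop := out = infer_structure_alt text
instance (text : String) (out : List (String × String)) : Decidable (Spec_infer_structure text out) := by unfold Spec_infer_structure; infer_instance

-- ===== CLAIM (what is proved, stated in full; the proofs are below) =====
def Claim_equal_infer_structure : Prop := ∀ (text : String), Dom_infer_structure text → Pre_infer_structure text → Spec_infer_structure text (infer_structure text)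

-- ===== LEMMAS AND PROOFS =====

def pvNp (l : String) : Bool := !(pvPT l || pvPD l || pvPC l)

-- the three prefixes are mutually exclusive
theorem pv_excl (p q l : String) (hlen : p.toList.length ≤ q.toList.length)
    (hnp : ¬ p.toList <+: q.toList) (hp : PySem.Str.startswith l p = true) :
    PySem.Str.startswith l q = false := by
  by_contra h
  rw [Bool.not_eq_false] at h
  rw [PySem.Str.startswith_eq] at hp h
  exact hnp (List.prefix_of_prefix_length_le
    ((PySem.Chars.startswith_iff _ _).mp hp) ((PySem.Chars.startswith_iff _ _).mp h) hlen)

theorem pT_not_pD (l : String) (h : pvPT l = true) : pvPD l = false :=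
  pv_excl _ _ _ (by decide) (by decide) h

theorem pT_not_pC (l : String) (h : pvPT l = true) : pvPC l = false :=
  pv_excl _ _ _ (by decide) (by decide) h

theorem pD_not_pC (l : String) (h : pvPD l = true) : pvPC l = false := by
  by_contra hc
  rw [Bool.not_eq_false] at hc
  have h2 := pv_excl "Content:" "Description:" l (by decide) (by decide) hc
  unfold pvPD at h
  rw [h] at h2
  exact absurd h2 (by simp)

-- declarative descriptions of A's loop state
def pvDictA : List String → PySem.Dict String String → PySem.Dict String String
  | [], st => st
  | l :: ls, st =>
    if pvPT l then pvDictA ls (st.insert "title" (pvRm l "Title:"))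
    else if pvPD l then pvDictA ls (st.insert "description" (pvRm l "Description:"))
    else pvDictA ls st

def pvCont : List String → Bool → List String
  | [], _ => []
  | l :: ls, true => if pvNp l then l :: pvCont ls true else pvCont ls true
  | l :: ls, false => if pvPC l then pvCont ls true else pvCont ls false

theorem foldA_char (ls : List String) : ∀ (st : PySem.Dict String String) (cls : List String) (inc : Bool),
    ls.foldl pvStepA (st, cls, inc) = (pvDictA ls st, cls ++ pvCont ls inc, inc || ls.any pvPC) := by
  induction ls with
  | nil => intro st cls inc; simp [pvDictA, pvCont]
  | cons l ls ih =>
    intro st cls inc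
    by_cases hT : pvPT l = true
    · have hC := pT_not_pC l hT
      cases inc <;>
        simp [pvStepA, hT, hC, ih, pvDictA, pvCont, pvNp]
    · by_cases hD : pvPD l = true
      · have hC := pD_not_pC l hD
        cases inc <;>
          simp [pvStepA, hT, hD, hC, ih, pvDictA, pvCont, pvNp]
      · by_cases hC : pvPC l = true
        · cases inc <;>
            simp [pvStepA, hT, hD, hC, ih, pvDictA, pvCont, pvNp]
        · cases inc <;>
            simp [pvStepA, hT, hD, hC, ih, pvDictA, pvCont, pvNp, List.foldl_cons]

-- content characterization
theorem cont_true (ls : List String) : pvCont ls true = ls.filter pvNp := by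
  induction ls with
  | nil => simp [pvCont]
  | cons l ls ih => by_cases h : pvNp l = true <;> simp [pvCont, h, ih]

theorem cont_false (ls : List String) :
    pvCont ls false = (ls.drop (ls.findIdx pvPC + 1)).filter pvNp := by
  induction ls with
  | nil => simp [pvCont]
  | cons l ls ih =>
    by_cases h : pvPC l = true
    · simp [pvCont, h, cont_true, List.findIdx_cons]
    · simp [pvCont, h, ih, List.findIdx_cons]

-- dict characterization: the reachable dict states
def pvRender : Option String → Option String → Bool → PySem.Dict String String
  | none, none, _ => PySem.Dict.empty
  | some t, none, _ => PySem.Dict.empty.insert "title" t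
  | none, some d, _ => PySem.Dict.empty.insert "description" d
  | some t, some d, true => (PySem.Dict.empty.insert "title" t).insert "description" d
  | some t, some d, false => (PySem.Dict.empty.insert "description" d).insert "title" t

def pvLastT (ls : List String) : Option String := ((ls.filter pvPT).map (fun l => pvRm l "Title:")).getLast?
def pvLastD (ls : List String) : Option String := ((ls.filter pvPD).map (fun l => pvRm l "Description:")).getLast?

def pvTf (ot od : Option String) (tf : Bool) (ls : List String) : Bool :=
  match ot, od with
  | some _, some _ => tf
  | some _, none => true
  | none, some _ => false
  | none, none => decide (ls.findIdx pvPT < ls.findIdx pvPD)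

theorem insert_title_render (ot od : Option String) (tf : Bool) (v : String) :
    (pvRender ot od tf).insert "title" v
      = pvRender (some v) od (match ot, od with
          | _, none => true
          | some _, some _ => tf
          | none, some _ => false) := by
  cases ot <;> cases od <;> cases tf <;>
    simp [pvRender, PySem.Dict.insert, PySem.Dict.empty]

theorem insert_desc_render (ot od : Option String) (tf : Bool) (w : String) :
    (pvRender ot od tf).insert "description" w
      = pvRender ot (some w) (match ot, od with
          | none, _ => false
          | some _, some _ => tf
          | some _, none => true) := by
  cases ot <;> cases od <;> cases tf <;>
    simp [pvRender, PySem.Dict.insert, PySem.Dict.empty]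

theorem lastT_cons_pos (l : String) (ls : List String) (h : pvPT l = true) (ot : Option String) :
    (pvLastT (l :: ls)).or ot = (pvLastT ls).or (some (pvRm l "Title:")) := by
  unfold pvLastT
  rw [List.filter_cons_of_pos h, List.map_cons]
  cases hrest : (ls.filter pvPT).map (fun l => pvRm l "Title:") with
  | nil => simp
  | cons x xs => simp [List.getLast?_cons_cons, Option.or_of_isSome, List.getLast?_isSome]

theorem lastD_cons_pos (l : String) (ls : List String) (h : pvPD l = true) (od : Option String) :
    (pvLastD (l :: ls)).or od = (pvLastD ls).or (some (pvRm l "Description:")) := by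
  unfold pvLastD
  rw [List.filter_cons_of_pos h, List.map_cons]
  cases hrest : (ls.filter pvPD).map (fun l => pvRm l "Description:") with
  | nil => simp
  | cons x xs => simp [List.getLast?_cons_cons, Option.or_of_isSome, List.getLast?_isSome]

theorem dictA_char (ls : List String) : ∀ (ot od : Option String) (tf : Bool),
    pvDictA ls (pvRender ot od tf)
      = pvRender ((pvLastT ls).or ot) ((pvLastD ls).or od) (pvTf ot od tf ls) := by
  induction ls with
  | nil => intro ot od tf; cases ot <;> cases od <;> simp [pvDictA, pvLastT, pvLastD, pvTf, pvRender]
  | cons l ls ih =>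
    intro ot od tf
    by_cases hT : pvPT l = true
    · have hD := pT_not_pD l hT
      have e2 : pvLastD (l :: ls) = pvLastD ls := by
        unfold pvLastD; rw [List.filter_cons_of_neg (by simp [hD])]
      rw [show pvDictA (l :: ls) (pvRender ot od tf)
            = pvDictA ls ((pvRender ot od tf).insert "title" (pvRm l "Title:")) from by
          simp [pvDictA, hT]]
      rw [insert_title_render, ih, lastT_cons_pos l ls hT, e2]
      congr 1
      cases ot <;> cases od <;> simp [pvTf, List.findIdx_cons, hT, hD]
    · by_cases hD : pvPD l = true
      · have e1 : pvLastT (l :: ls) = pvLastT ls := by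
          unfold pvLastT; rw [List.filter_cons_of_neg (by simp [hT])]
        rw [show pvDictA (l :: ls) (pvRender ot od tf)
              = pvDictA ls ((pvRender ot od tf).insert "description" (pvRm l "Description:")) from by
            simp [pvDictA, hT, hD]]
        rw [insert_desc_render, ih, lastD_cons_pos l ls hD, e1]
        congr 1
        cases ot <;> cases od <;> simp [pvTf, List.findIdx_cons, hT, hD]
      · have e1 : pvLastT (l :: ls) = pvLastT ls := by
          unfold pvLastT; rw [List.filter_cons_of_neg (by simp [hT])]
        have e2 : pvLastD (l :: ls) = pvLastD ls := by
          unfold pvLastD; rw [List.filter_cons_of_neg (by simp [hD])]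
        rw [show pvDictA (l :: ls) (pvRender ot od tf) = pvDictA ls (pvRender ot od tf) from by
            simp [pvDictA, hT, hD]]
        rw [ih, e1, e2]
        congr 1
        cases ot <;> cases od <;> simp [pvTf, List.findIdx_cons, hT, hD]

-- a non-empty filter result means some element satisfies the predicate
theorem lastT_some_any (ls : List String) (t : String) (h : pvLastT ls = some t) :
    ls.any pvPT = true := by
  rcases List.mem_of_getLast? h with hm
  rcases List.mem_map.mp hm with ⟨l, hl, _⟩
  exact List.any_eq_true.mpr ⟨l, List.mem_of_mem_filter hl, List.of_mem_filter hl⟩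

theorem lastD_some_any (ls : List String) (d : String) (h : pvLastD ls = some d) :
    ls.any pvPD = true := by
  rcases List.mem_of_getLast? h with hm
  rcases List.mem_map.mp hm with ⟨l, hl, _⟩
  exact List.any_eq_true.mpr ⟨l, List.mem_of_mem_filter hl, List.of_mem_filter hl⟩

theorem pvMain (lines : List String)
    (hpre : lines.any pvPT → lines.any pvPD → lines.findIdx pvPT < lines.findIdx pvPD) :
    pvBodyA lines = pvBodyB lines := by
  have hnp : (fun l : String => !(pvPT l || pvPD l || pvPC l)) = pvNp := by
    funext l; simp [pvNp]
  simp only [pvBodyA, pvBodyB, hnp]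
  rw [foldA_char]
  dsimp only
  rw [show (PySem.Dict.empty : PySem.Dict String String) = pvRender none none true from rfl,
      dictA_char, cont_false]
  simp only [Option.or_none, pvTf, List.nil_append]
  rcases hT : pvLastT lines with _ | t <;> rcases hD : pvLastD lines with _ | d <;>
    simp only [pvLastT, pvLastD] at hT hD <;> rw [hT, hD]
  · by_cases hc : (lines.drop (lines.findIdx pvPC + 1)).filter pvNp = [] <;>
      simp [pvRender, hc, PySem.Dict.insert, PySem.Dict.empty]
  · by_cases hc : (lines.drop (lines.findIdx pvPC + 1)).filter pvNp = [] <;>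
      simp [pvRender, hc, PySem.Dict.insert, PySem.Dict.empty]
  · by_cases hc : (lines.drop (lines.findIdx pvPC + 1)).filter pvNp = [] <;>
      simp [pvRender, hc, PySem.Dict.insert, PySem.Dict.empty]
  · have hlt : lines.findIdx pvPT < lines.findIdx pvPD :=
      hpre (lastT_some_any lines t hT) (lastD_some_any lines d hD)
    by_cases hc : (lines.drop (lines.findIdx pvPC + 1)).filter pvNp = [] <;>
      simp [pvRender, hc, hlt, PySem.Dict.insert, PySem.Dict.empty]

-- ===== VERDICT (by name: the statement is the Claim_ definition above) =====
theorem infer_structure_spec : Claim_equal_infer_structure := by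
  intro text _ hpre
  unfold Spec_infer_structure infer_structure infer_structure_alt
  exact pvMain _ hpre
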